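-- pv_equiv track=rewrite | github.com/ike-mexico-360/ike-addons | custom_supplier_cost_matrix/models/custom_supplier_upload_cost_matrix.py | _convert_import_data_to_json
-- ===== SOURCE A (Python) =====
-- def _convert_import_data_to_json(rows, columns) -> list[dict]:
--     """ Convertir datos de importación al estilo JSON esperado """
--     header = rows[0]
--     # Obtener columnas requeridas
--     column_idx = {col: idx for idx, col in enumerate(header) if col in columns}
--     if not column_idx:
--         raise ValueError("Ninguna de las columnas requeridas está presente en el archivo.")
--     records = [
--         {col_name: row[col_id] for col_name, col_id in column_idx.items()}
--         for row in rows[1:]  # Ignorar la fila de encabezados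
--     ]
--     return records
-- ===== SOURCE B (Python) =====
-- def _convert_import_data_to_json(rows, columns) -> list[dict]:
--     """Column-major rebuild: select (name, idx) pairs from the header, extract
--     each selected column as a vector, then transpose back into row dicts."""
--     header, *data = rows
--     sel = {}
--     for idx, col in enumerate(header):
--         if col in columns:
--             sel[col] = idx
--     if not sel:
--         raise ValueError("Ninguna de las columnas requeridas está presente en el archivo.")
--     names = list(sel)
--     vectors = [[row[i] for row in data] for i in sel.values()]
--     return [dict(zip(names, tup)) for tup in zip(*vectors)]
-- ===== Notes on version B (the rewrite author's own statement) =====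
-- stated objective: alternative
-- what changed: B builds the result column-major: it extracts each selected column as a value vector and transposes the vectors back into row dicts with zip, instead of A's row-outer per-row dict comprehension.
import Mathlib
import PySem

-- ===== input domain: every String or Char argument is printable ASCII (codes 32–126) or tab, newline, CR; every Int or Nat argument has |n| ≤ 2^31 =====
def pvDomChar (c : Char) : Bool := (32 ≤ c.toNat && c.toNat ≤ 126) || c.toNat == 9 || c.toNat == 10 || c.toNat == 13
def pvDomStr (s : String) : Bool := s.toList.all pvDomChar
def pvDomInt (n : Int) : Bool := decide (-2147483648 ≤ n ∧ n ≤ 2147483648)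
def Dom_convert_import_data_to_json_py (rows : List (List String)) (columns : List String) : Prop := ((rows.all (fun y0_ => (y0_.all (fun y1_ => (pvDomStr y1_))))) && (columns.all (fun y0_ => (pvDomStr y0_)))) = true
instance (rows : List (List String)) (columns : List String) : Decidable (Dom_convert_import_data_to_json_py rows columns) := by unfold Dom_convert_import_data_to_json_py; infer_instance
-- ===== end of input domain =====

-- B rebuilds the records column-major (select columns, extract each column vector, transpose);
-- objective: alternative decomposition, same cost. Equal to A on Pre_ (no crash inputs).

-- ===== PORT A =====
-- row-major: dict of selected (col, idx), then one dict per data row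
def convert_import_data_to_json_py (rows : List (List String)) (columns : List String) : List (List (String × String)) :=
  let header := PySem.List.pyGetD rows 0 []        -- rows[0]; [] stands for the excluded IndexError
  let column_idx : PySem.Dict String Int :=
    (PySem.List.enumerate header).foldl
      (fun d p => if columns.contains p.2 then d.insert p.2 p.1 else d) PySem.Dict.empty
  if column_idx.items = [] then []                 -- Python raises ValueError here; excluded by Pre_
  else (PySem.List.slice rows (some 1) none).map
    (fun row => column_idx.items.map (fun p => (p.1, PySem.List.pyGetD row p.2 "")))

-- ===== PORT B =====
-- zip(*vectors) where every vector has length n (true in B: each vector has one entry per data row)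
def pvZipStar (n : Nat) (ls : List (List String)) : List (List String) :=
  match n with
  | 0 => []
  | n + 1 => ls.map (fun l => l.headD "") :: pvZipStar n (ls.map List.tail)

def convert_import_data_to_json_py_alt (rows : List (List String)) (columns : List String) : List (List (String × String)) :=
  match rows with
  | [] => []                                       -- 'header, *data = rows' raises; excluded by Pre_
  | header :: data =>
    let sel : PySem.Dict String Int :=
      (PySem.List.enumerate header).foldl
        (fun d p => if columns.contains p.2 then d.insert p.2 p.1 else d) PySem.Dict.empty
    if sel.items = [] then []                      -- Python raises ValueError here; excluded by Pre_
    else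
      let names := sel.keys
      let vectors := sel.values.map (fun i => data.map (fun row => PySem.List.pyGetD row i ""))
      (pvZipStar data.length vectors).map (fun tup => names.zip tup)

-- ===== PRECONDITION & SPEC =====
-- Pre_ excludes exactly the crash inputs: empty rows (IndexError on rows[0]), a header with no
-- required column (ValueError), and data rows too short for a selected column index (IndexError).
def Pre_convert_import_data_to_json_py (rows : List (List String)) (columns : List String) : Prop :=
  rows ≠ [] ∧ (∃ col ∈ rows.headD [], col ∈ columns) ∧
  ∀ i : Fin (rows.headD []).length, (rows.headD [])[i] ∈ columns →
    ∀ row ∈ rows.tail, (i : Nat) < row.length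
instance (rows : List (List String)) (columns : List String) : Decidable (Pre_convert_import_data_to_json_py rows columns) := by unfold Pre_convert_import_data_to_json_py; infer_instance

def pvWitness_convert_import_data_to_json_py : List (List String) × List String :=
  ([["a", "b"], ["1", "2"], ["3", "4"]], ["b"])

def Spec_convert_import_data_to_json_py (rows : List (List String)) (columns : List String) (out : List (List (String × String))) : Prop := out = convert_import_data_to_json_py_alt rows columns
instance (rows : List (List String)) (columns : List String) (out : List (List (String × String))) : Decidable (Spec_convert_import_data_to_json_py rows columns out) := by unfold Spec_convert_import_data_to_json_py; infer_instance

-- ===== CLAIM (what is proved, stated in full; the proofs are below) =====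
def Claim_equal_convert_import_data_to_json_py : Prop := ∀ (rows : List (List String)) (columns : List String), Dom_convert_import_data_to_json_py rows columns → Pre_convert_import_data_to_json_py rows columns → Spec_convert_import_data_to_json_py rows columns (convert_import_data_to_json_py rows columns)

-- ===== LEMMAS AND PROOFS =====

-- transposing per-column maps gives the per-row maps
theorem pvZipStar_map_map {β : Type} (data : List (List String)) (ps : List β)
    (f : β → List String → String) :
    pvZipStar data.length (ps.map (fun p => data.map (f p)))
      = data.map (fun r => ps.map (fun p => f p r)) := by
  induction data generalizing ps with
  | nil => simp [pvZipStar]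
  | cons r data ih =>
    simp only [List.length_cons, pvZipStar, List.map_map, List.map_cons]
    refine congrArg₂ _ ?_ ?_
    · simp [Function.comp]
    · simpa [Function.comp] using ih ps

theorem pvWitness_ok :
    Dom_convert_import_data_to_json_py pvWitness_convert_import_data_to_json_py.1 pvWitness_convert_import_data_to_json_py.2 ∧
    Pre_convert_import_data_to_json_py pvWitness_convert_import_data_to_json_py.1 pvWitness_convert_import_data_to_json_py.2 := by
  decide

-- ===== VERDICT (by name: the statement is the Claim_ definition above) =====
theorem convert_import_data_to_json_py_spec : Claim_equal_convert_import_data_to_json_py := by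
  intro rows columns _ hpre
  obtain ⟨hne, -, -⟩ := hpre
  unfold Spec_convert_import_data_to_json_py
  cases rows with
  | nil => exact absurd rfl hne
  | cons header data =>
    simp only [convert_import_data_to_json_py, convert_import_data_to_json_py_alt]
    have hhd : PySem.List.pyGetD (header :: data) 0 [] = header := by
      simp [PySem.List.pyGetD, PySem.List.pyGet?, PySem.List.pyIdx?]
    rw [hhd, PySem.List.slice_from_one]
    set sel : PySem.Dict String Int :=
      (PySem.List.enumerate header).foldl
        (fun d p => if columns.contains p.2 then d.insert p.2 p.1 else d) PySem.Dict.empty with hsel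
    by_cases hempty : sel.items = []
    · simp [hempty]
    · simp only [hempty, ite_false, List.tail_cons]
      have hvec : sel.values.map (fun i => data.map (fun row => PySem.List.pyGetD row i ""))
          = sel.items.map (fun p => data.map (fun row => PySem.List.pyGetD row p.2 "")) := by
        simp [PySem.Dict.values, List.map_map, Function.comp]
      rw [hvec, pvZipStar_map_map data sel.items (fun p row => PySem.List.pyGetD row p.2 "")]
      rw [List.map_map]
      refine List.map_congr_left (fun r _ => ?_)
      simp only [Function.comp, PySem.Dict.keys]
      rw [List.zip_map']
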